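-- pv_equiv track=rewrite | github.com/Surrep/R-D | learn2learn/utilities/io.py | make_vocab
-- ===== SOURCE A (Python) =====
-- def make_vocab(corpus):
--     vocab = {}
--     identity = 0
--
--     for word in corpus:
--         if word not in vocab:
--             vocab[word] = identity
--             identity += 1
--
--     return vocab
-- ===== SOURCE B (Python) =====
-- def make_vocab(corpus):
--     # peel-and-filter: record the first remaining word, strip all its copies,
--     # repeat; ids are positions in the growing item list (no membership test)
--     items = []
--     rest = corpus
--     while rest:
--         w = rest[0]
--         items.append((w, len(items)))
--         rest = [x for x in rest[1:] if x != w]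
--     return dict(items)
-- ===== Notes on version B (the rewrite author's own statement) =====
-- stated objective: alternative
-- what changed: Replaces A's single guarded pass carrying a dict and a counter with a peel-and-filter loop: repeatedly take the first remaining word, give it the next id, and filter every copy of it out of the remainder, so no membership test and no counter variable are needed (O(n*u) instead of O(n)).
import Mathlib
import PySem

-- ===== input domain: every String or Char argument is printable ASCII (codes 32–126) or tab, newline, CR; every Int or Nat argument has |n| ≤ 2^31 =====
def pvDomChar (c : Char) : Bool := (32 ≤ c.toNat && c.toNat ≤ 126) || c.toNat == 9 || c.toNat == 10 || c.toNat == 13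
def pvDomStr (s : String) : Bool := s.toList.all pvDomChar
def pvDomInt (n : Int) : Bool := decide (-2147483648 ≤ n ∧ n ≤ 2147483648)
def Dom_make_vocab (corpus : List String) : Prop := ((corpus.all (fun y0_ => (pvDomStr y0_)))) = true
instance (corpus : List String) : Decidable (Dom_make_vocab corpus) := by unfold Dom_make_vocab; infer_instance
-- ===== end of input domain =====

-- B replaces A's single guarded dict+counter pass with a peel-and-filter loop
-- (take the first remaining word, record it, filter out all its copies, repeat);
-- objective: alternative (no membership test, no counter; O(n*u) instead of O(n)).

-- ===== PORT A =====
-- single loop: dict 'vocab' plus counter 'identity'; insert on first sight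
def make_vocab (corpus : List String) : List (String × Int) :=
  (corpus.foldl
    (fun (st : PySem.Dict String Int × Int) word =>
      if st.1.contains word then st else (st.1.insert word st.2, st.2 + 1))
    (PySem.Dict.empty, 0)).1.items

-- ===== PORT B =====
-- the while loop: items accumulator, rest := rest[1:] with all copies of rest[0] filtered out
def make_vocab_alt_loop (items : List (String × Int)) (rest : List String) :
    List (String × Int) :=
  match rest with
  | [] => items
  | w :: rs =>
      make_vocab_alt_loop (items ++ [(w, (items.length : Int))]) (rs.filter (fun x => x != w))
termination_by rest.length
decreasing_by
  simpa using Nat.lt_succ_of_le (List.length_filter_le _ rs)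

def make_vocab_alt (corpus : List String) : List (String × Int) :=
  make_vocab_alt_loop [] corpus

-- ===== PRECONDITION & SPEC =====
def Spec_make_vocab (corpus : List String) (out : List (String × Int)) : Prop := out = make_vocab_alt corpus
instance (corpus : List String) (out : List (String × Int)) : Decidable (Spec_make_vocab corpus out) := by unfold Spec_make_vocab; infer_instance

-- ===== CLAIM (what is proved, stated in full; the proofs are below) =====
def Claim_equal_make_vocab : Prop := ∀ (corpus : List String), Dom_make_vocab corpus → Spec_make_vocab corpus (make_vocab corpus)

-- ===== LEMMAS AND PROOFS =====

-- A-side loop invariant: a dict whose items are the enumerated (flipped) seen-words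
-- list u, paired with counter u.length, folds A's step to the enumeration of the
-- ordered-set fold (= dedup).
theorem make_vocab_inv (corpus : List String) :
    ∀ (d : PySem.Dict String Int) (u : List String),
      d.items = (PySem.List.enumerate u 0).map (fun p => (p.2, p.1)) →
      (corpus.foldl
        (fun (st : PySem.Dict String Int × Int) word =>
          if st.1.contains word then st else (st.1.insert word st.2, st.2 + 1))
        (d, (u.length : Int))).1.items
      = (PySem.List.enumerate (corpus.foldl PySem.Set.add u) 0).map (fun p => (p.2, p.1)) := by
  induction corpus with
  | nil => intro d u h; simpa using h
  | cons w ws ih =>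
    intro d u h
    have hkeys : d.keys = u := by
      simp only [PySem.Dict.keys, h, List.map_map]
      exact PySem.List.map_snd_enumerate u 0
    have hcont : d.contains w = u.contains w := by
      rw [PySem.Dict.contains_eq_decide_mem_keys, hkeys]
      simp
    have hsc : PySem.Set.contains u w = u.contains w := rfl
    simp only [List.foldl_cons]
    by_cases hw : u.contains w = true
    · -- already seen: both the dict and the set are unchanged
      have hadd : PySem.Set.add u w = u := by
        simp only [PySem.Set.add]
        rw [hsc, if_pos hw]
      rw [hadd, hcont, if_pos hw]
      exact ih d u h
    · -- fresh word: appended to the dict and to the set, counter bumped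
      have hC : d.contains w = false := by rw [hcont]; exact eq_false_of_ne_true hw
      have hadd : PySem.Set.add u w = u ++ [w] := by
        simp only [PySem.Set.add]
        rw [hsc, if_neg hw]
      rw [hadd, hcont, if_neg hw]
      have hitems' : (d.insert w (u.length : Int)).items
          = (PySem.List.enumerate (u ++ [w]) 0).map (fun p => (p.2, p.1)) := by
        rw [PySem.Dict.items_insert_of_not_contains d (u.length : Int) hC, h,
            PySem.List.enumerate_append]
        simp [PySem.List.enumerate_cons, PySem.List.enumerate_nil]
      have hrec := ih (d.insert w (u.length : Int)) (u ++ [w]) hitems'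
      simpa using hrec

-- filtering out an already-seen word does not change the ordered-set fold
theorem foldl_add_filter (ws : List String) (u : List String) (w : String)
    (hw : u.contains w = true) :
    ws.foldl PySem.Set.add u = (ws.filter (fun x => x != w)).foldl PySem.Set.add u := by
  induction ws generalizing u with
  | nil => rfl
  | cons x xs ih =>
    by_cases hx : x = w
    · subst hx
      have h1 : (x :: xs).filter (fun y => y != x) = xs.filter (fun y => y != x) := by simp
      have h2 : PySem.Set.add u x = u := by
        simp only [PySem.Set.add, PySem.Set.contains]
        rw [if_pos hw]
      rw [h1, List.foldl_cons, h2]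
      exact ih u hw
    · have h1 : (x :: xs).filter (fun y => y != w) = x :: xs.filter (fun y => y != w) := by
        simp [hx]
      rw [h1, List.foldl_cons, List.foldl_cons]
      apply ih
      simp only [PySem.Set.add, PySem.Set.contains]
      split
      · exact hw
      · simp_all

-- adding only w-free words keeps a leading w in front
theorem foldl_add_cons_head (w : String) (l : List String) :
    ∀ (u : List String), (∀ x ∈ l, x ≠ w) →
      l.foldl PySem.Set.add (w :: u) = w :: l.foldl PySem.Set.add u := by
  induction l with
  | nil => intro u _; rfl
  | cons x xs ih =>
    intro u hl
    have hxw : x ≠ w := hl x (List.mem_cons_self ..)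
    have hstep : PySem.Set.add (w :: u) x = w :: PySem.Set.add u x := by
      simp only [PySem.Set.add, PySem.Set.contains, List.contains_cons]
      have : (x == w) = false := by simpa using hxw
      rw [this]
      simp only [Bool.false_or]
      split <;> rfl
    rw [List.foldl_cons, List.foldl_cons, hstep]
    exact ih (PySem.Set.add u x) (fun y hy => hl y (List.mem_cons_of_mem _ hy))

-- dedup peels its head: first word, then the dedup of the w-free tail
theorem dedup_cons_filter (w : String) (ws : List String) :
    PySem.List.dedup (w :: ws)
      = w :: PySem.List.dedup (ws.filter (fun x => x != w)) := by
  have h1 : PySem.List.dedup (w :: ws) = ws.foldl PySem.Set.add [w] := by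
    simp [PySem.List.dedup, PySem.Set.ofList, PySem.Set.add, PySem.Set.contains,
      PySem.Set.empty]
  have h2 : PySem.List.dedup (ws.filter (fun x => x != w))
      = (ws.filter (fun x => x != w)).foldl PySem.Set.add [] := by
    simp [PySem.List.dedup, PySem.Set.ofList, PySem.Set.empty]
  have hmem : ([w] : List String).contains w = true := by simp
  rw [h1, h2, foldl_add_filter ws [w] w hmem]
  have hfree : ∀ x ∈ ws.filter (fun x => x != w), x ≠ w := by
    intro x hx
    have := (List.mem_filter.mp hx).2
    simpa using this
  exact foldl_add_cons_head w (ws.filter (fun x => x != w)) [] hfree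

-- B's loop computes items ++ flipped enumeration of the dedup, ids starting at |items|
theorem make_vocab_alt_loop_eq (items : List (String × Int)) (rest : List String) :
    make_vocab_alt_loop items rest
      = items ++ (PySem.List.enumerate (PySem.List.dedup rest) (items.length : Int)).map
          (fun p => (p.2, p.1)) := by
  induction items, rest using make_vocab_alt_loop.induct with
  | case1 items =>
    simp [make_vocab_alt_loop, PySem.List.dedup, PySem.Set.ofList, PySem.Set.empty,
      PySem.List.enumerate_nil]
  | case2 items w rs ih =>
    simp only [List.unattach_filter, List.unattach_attach] at ih
    rw [make_vocab_alt_loop, ih, dedup_cons_filter, PySem.List.enumerate_cons]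
    simp [List.append_assoc]

-- ===== VERDICT (by name: the statement is the Claim_ definition above) =====
theorem make_vocab_spec : Claim_equal_make_vocab := by
  intro corpus _
  unfold Spec_make_vocab make_vocab make_vocab_alt
  have hA := make_vocab_inv corpus PySem.Dict.empty [] (by rfl)
  have hB := make_vocab_alt_loop_eq [] corpus
  simp only [List.length_nil, Nat.cast_zero] at hA hB
  rw [hB]
  simpa [PySem.List.dedup, PySem.Set.ofList, PySem.Set.empty] using hA
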